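-- pv_equiv track=rewrite | github.com/Shuai-Xie/CV_utils | base_py/collection.py | cal_str_diff
-- ===== SOURCE A (Python) =====
-- def cal_str_diff(s1, s2):
--     """ 逐位置比较两个 str """
--     LEN = max(len(s1), len(s2))
--     diff = [1] * LEN
--     for idx, (c1, c2) in enumerate(zip(s1, s2)):
--         if c1 == c2:
--             diff[idx] = 0
--     s = s1 if len(s1) > len(s2) else s2
--     return ''.join([s[i] for i, elem in enumerate(diff) if elem == 1])
-- ===== SOURCE B (Python) =====
-- def cal_str_diff(s1, s2):
--     if len(s1) > len(s2):
--         s, t = s1, s2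
--     else:
--         s, t = s2, s1
--     res = []
--     for i, c in enumerate(s):
--         if i >= len(t) or c != t[i]:
--             res.append(c)
--     return ''.join(res)
-- ===== Notes on version B (the rewrite author's own statement) =====
-- stated objective: simpler
-- what changed: B fuses A's two passes (build a full 0/1 diff mask over max(len), then filter the longer string by the mask) into one direct scan over the longer string that appends a char when the position is past the shorter string or the chars differ; no intermediate mask list.
import Mathlib
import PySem

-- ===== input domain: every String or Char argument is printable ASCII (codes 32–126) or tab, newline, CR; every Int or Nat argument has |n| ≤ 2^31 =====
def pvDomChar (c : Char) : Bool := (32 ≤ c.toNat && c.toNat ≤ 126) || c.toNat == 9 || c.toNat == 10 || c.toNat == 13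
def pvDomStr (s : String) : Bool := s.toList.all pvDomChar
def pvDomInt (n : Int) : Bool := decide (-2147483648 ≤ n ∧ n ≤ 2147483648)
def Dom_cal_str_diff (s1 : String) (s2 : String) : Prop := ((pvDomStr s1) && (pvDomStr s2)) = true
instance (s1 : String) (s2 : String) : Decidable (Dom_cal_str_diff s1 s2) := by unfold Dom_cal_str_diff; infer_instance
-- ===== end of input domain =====

set_option maxRecDepth 4000


-- B replaces A's build-a-mask-then-filter two-pass structure with one fused scan over the
-- longer string (simpler; no intermediate table).

-- ===== PORT A =====
def cal_str_diff (s1 : String) (s2 : String) : String :=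
  let l1 := s1.toList
  let l2 := s2.toList
  let LEN := max l1.length l2.length
  let diff : List Int := List.replicate LEN 1
  let diff := (PySem.List.enumerate (l1.zip l2) 0).foldl
    (fun d p => if p.2.1 == p.2.2 then d.set p.1.toNat 0 else d) diff
  let s := if l1.length > l2.length then l1 else l2
  -- s[i]: i always in range (s is the longer string and LEN = its length), so pyGet? is always some
  String.mk (((PySem.List.enumerate diff 0).filter (fun p => p.2 == 1)).filterMap
    (fun p => PySem.List.pyGet? s p.1))

-- ===== PORT B =====
def cal_str_diff_alt (s1 : String) (s2 : String) : String :=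
  let st := if s1.toList.length > s2.toList.length then (s1.toList, s2.toList)
            else (s2.toList, s1.toList)
  String.mk ((PySem.List.enumerate st.1 0).foldl
    (fun acc q =>
      match PySem.List.pyGet? st.2 q.1 with
      | some c2 => if q.2 == c2 then acc else acc ++ [q.2]
      | none => acc ++ [q.2]) [])

-- ===== PRECONDITION & SPEC =====
def Spec_cal_str_diff (s1 : String) (s2 : String) (out : String) : Prop := out = cal_str_diff_alt s1 s2
instance (s1 : String) (s2 : String) (out : String) : Decidable (Spec_cal_str_diff s1 s2 out) := by unfold Spec_cal_str_diff; infer_instance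

-- ===== CLAIM (what is proved, stated in full; the proofs are below) =====
def Claim_equal_cal_str_diff : Prop := ∀ (s1 : String) (s2 : String), Dom_cal_str_diff s1 s2 → Spec_cal_str_diff s1 s2 (cal_str_diff s1 s2)

-- ===== LEMMAS AND PROOFS =====

-- setting position pre.length in (pre ++ x :: l)
lemma pv_set_append_cons (pre l : List Int) (x v : Int) :
    (pre ++ x :: l).set pre.length v = pre ++ v :: l := by
  induction pre with
  | nil => simp
  | cons a pre ih => simp [ih]

-- A's mask-building foldl, characterised
lemma pv_mask_foldl (zl : List (Char × Char)) : ∀ (pre rest : List Int),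
    (PySem.List.enumerate zl (pre.length : Int)).foldl
      (fun d p => if p.2.1 == p.2.2 then d.set p.1.toNat 0 else d)
      (pre ++ List.replicate zl.length 1 ++ rest)
    = pre ++ zl.map (fun p => if p.1 == p.2 then (0:Int) else 1) ++ rest := by
  induction zl with
  | nil => intro pre rest; simp [PySem.List.enumerate_nil]
  | cons ab zl ih =>
    intro pre rest
    rw [PySem.List.enumerate_cons]
    simp only [List.foldl_cons, List.length_cons, List.replicate_succ]
    by_cases h : ab.1 == ab.2
    · rw [if_pos h]
      have hset : (pre ++ (1 :: List.replicate zl.length 1) ++ rest).set (pre.length : Int).toNat 0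
          = (pre ++ [(0:Int)]) ++ List.replicate zl.length 1 ++ rest := by
        have := pv_set_append_cons pre (List.replicate zl.length 1 ++ rest) 1 0
        simpa [List.append_assoc] using this
      have hlen : ((pre.length : Int) + 1) = (((pre ++ [(0:Int)]).length : Int)) := by simp
      rw [hset, hlen, ih]
      have h' : ab.1 = ab.2 := eq_of_beq h
      simp [List.append_assoc, h']
    · rw [if_neg h]
      have heq : pre ++ (1 :: List.replicate zl.length 1) ++ rest
          = (pre ++ [(1:Int)]) ++ List.replicate zl.length 1 ++ rest := by
        simp [List.append_assoc]
      have hlen : ((pre.length : Int) + 1) = (((pre ++ [(1:Int)]).length : Int)) := by simp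
      rw [heq, hlen, ih]
      have h' : ¬ ab.1 = ab.2 := by simpa using h
      simp [List.append_assoc, h']

-- A's final comprehension, characterised as a zip with the mask
lemma pv_sel (s : List Char) : ∀ (mask : List Int) (n : Nat), n + mask.length = s.length →
    ((PySem.List.enumerate mask (n : Int)).filter (fun p => p.2 == 1)).filterMap
      (fun p => PySem.List.pyGet? s p.1)
    = ((s.drop n).zip mask).filterMap (fun q => if q.2 == 1 then some q.1 else none) := by
  intro mask
  induction mask with
  | nil => intro n _; simp [PySem.List.enumerate_nil]
  | cons m mask ih =>
    intro n hn
    have hlt : n < s.length := by simp at hn; omega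
    have hdrop : s.drop n = s[n] :: s.drop (n + 1) := List.drop_eq_getElem_cons hlt
    have hget : PySem.List.pyGet? s ((n : Int)) = some s[n] := by
      rw [PySem.List.pyGet?_natCast]; exact List.getElem?_eq_getElem hlt
    have hrec := ih (n + 1) (by simp at hn ⊢; omega)
    have hcast : ((n : Int) + 1) = ((n + 1 : Nat) : Int) := by push_cast; ring
    rw [PySem.List.enumerate_cons, hdrop]
    by_cases h : m == (1:Int)
    · have hR : List.filterMap (fun q => if (q.2 == (1:Int)) = true then some q.1 else none)
          ((s[n] :: s.drop (n+1)).zip (m :: mask))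
          = s[n] :: List.filterMap (fun q => if (q.2 == (1:Int)) = true then some q.1 else none)
            ((s.drop (n+1)).zip mask) := by
        rw [List.zip_cons_cons, List.filterMap_cons_some (b := s[n]) (by simp [h])]
      rw [List.filter_cons, if_pos h, List.filterMap_cons, hget, hcast, hrec, hR]
    · have hR : List.filterMap (fun q => if (q.2 == (1:Int)) = true then some q.1 else none)
          ((s[n] :: s.drop (n+1)).zip (m :: mask))
          = List.filterMap (fun q => if (q.2 == (1:Int)) = true then some q.1 else none)
            ((s.drop (n+1)).zip mask) := by
        rw [List.zip_cons_cons, List.filterMap_cons_none (by simp [h])]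
      rw [List.filter_cons, if_neg h, hcast, hrec, hR]

-- zipping a list with an all-ones mask keeps every element
lemma pv_ones (l : List Char) :
    (l.zip (List.replicate l.length (1:Int))).filterMap
      (fun q => if q.2 == 1 then some q.1 else none) = l := by
  induction l with
  | nil => simp
  | cons c l ih => simpa [List.replicate_succ] using ih

-- the zip-of-mask form equals the direct diff form (plus the tail of the longer string)
lemma pv_combine (s : List Char) : ∀ (t : List Char), t.length ≤ s.length →
    (s.zip ((s.zip t).map (fun p => if p.1 == p.2 then (0:Int) else 1)
        ++ List.replicate (s.length - t.length) 1)).filterMap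
      (fun q => if q.2 == 1 then some q.1 else none)
    = (s.zip t).filterMap (fun p => if p.1 == p.2 then none else some p.1) ++ s.drop t.length := by
  induction s with
  | nil => intro t ht; simp
  | cons c s ih =>
    intro t ht
    cases t with
    | nil =>
      simp only [List.zip_nil_right, List.map_nil, List.nil_append, List.length_nil,
        Nat.sub_zero, List.drop_zero, List.filterMap_nil]
      simpa using pv_ones (c :: s)
    | cons d t =>
      have ht' : t.length ≤ s.length := by simpa using ht
      have hsub : s.length + 1 - (t.length + 1) = s.length - t.length := by omega
      simp only [List.zip_cons_cons, List.map_cons, List.cons_append, List.filterMap_cons,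
        List.length_cons, List.drop_succ_cons, hsub]
      by_cases h : c == d
      · simp only [h, if_pos]
        rw [ih t ht']
        simp [h]
      · simp only [h]
        rw [ih t ht']
        simp [h]

-- zip masks are symmetric in the two strings
lemma pv_zip_swap (l1 : List Char) : ∀ (l2 : List Char),
    (l1.zip l2).map (fun p => if p.1 == p.2 then (0:Int) else 1)
    = (l2.zip l1).map (fun p => if p.1 == p.2 then (0:Int) else 1) := by
  induction l1 with
  | nil => intro l2; simp
  | cons a l1 ih =>
    intro l2
    cases l2 with
    | nil => simp
    | cons b l2 =>
      simp only [List.zip_cons_cons, List.map_cons, ih]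
      congr 1
      by_cases h : a = b
      · simp [h]
      · have h' : ¬ b = a := fun hh => h hh.symm
        simp [h, h']

-- B's fused scan, characterised
lemma pv_bscan (t : List Char) (s : List Char) : ∀ (n : Nat) (acc : List Char),
    (PySem.List.enumerate s (n : Int)).foldl
      (fun acc q =>
        match PySem.List.pyGet? t q.1 with
        | some c2 => if q.2 == c2 then acc else acc ++ [q.2]
        | none => acc ++ [q.2]) acc
    = acc ++ (s.zip (t.drop n)).filterMap (fun p => if p.1 == p.2 then none else some p.1)
        ++ s.drop (t.length - n) := by
  induction s with
  | nil => intro n acc; simp [PySem.List.enumerate_nil]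
  | cons c s ih =>
    intro n acc
    rw [PySem.List.enumerate_cons]
    have hcast : ((n : Int) + 1) = ((n + 1 : Nat) : Int) := by push_cast; ring
    by_cases h : n < t.length
    · have hget : PySem.List.pyGet? t ((n : Int)) = some t[n] := by
        rw [PySem.List.pyGet?_natCast]; exact List.getElem?_eq_getElem h
      have hdrop : t.drop n = t[n] :: t.drop (n + 1) := List.drop_eq_getElem_cons h
      have hsub : t.length - n = (t.length - (n + 1)) + 1 := by omega
      simp only [List.foldl_cons, hget]
      rw [hcast, ih (n + 1), hdrop, hsub, List.zip_cons_cons, List.drop_succ_cons]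
      by_cases hc : c == t[n]
      · rw [if_pos hc, List.filterMap_cons_none (by simp [hc])]
      · rw [if_neg hc, List.filterMap_cons_some (b := c) (by simp [hc])]
        simp [List.append_assoc]
    · have hget : PySem.List.pyGet? t ((n : Int)) = none := by
        rw [PySem.List.pyGet?_natCast]
        exact List.getElem?_eq_none (by omega)
      have hdrop : t.drop n = [] := List.drop_eq_nil_of_le (by omega)
      have hdrop' : t.drop (n + 1) = [] := List.drop_eq_nil_of_le (by omega)
      have hsub : t.length - n = 0 := by omega
      have hsub' : t.length - (n + 1) = 0 := by omega
      simp only [List.foldl_cons, hget]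
      rw [hcast, ih (n + 1), hdrop, hdrop', hsub, hsub']
      simp [List.append_assoc]

-- common list-level value of both ports, for a longer list s and shorter t
lemma pv_a_eq (s t : List Char) (ht : t.length ≤ s.length) (zl : List (Char × Char))
    (hz : zl.map (fun p => if p.1 == p.2 then (0:Int) else 1)
        = (s.zip t).map (fun p => if p.1 == p.2 then (0:Int) else 1))
    (hzl : zl.length = t.length) :
    (((PySem.List.enumerate
        ((PySem.List.enumerate zl 0).foldl
          (fun d p => if p.2.1 == p.2.2 then d.set p.1.toNat 0 else d)
          (List.replicate s.length (1:Int))) 0).filter (fun p => p.2 == 1)).filterMap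
      (fun p => PySem.List.pyGet? s p.1))
    = (s.zip t).filterMap (fun p => if p.1 == p.2 then none else some p.1) ++ s.drop t.length := by
  have hrep : (List.replicate s.length (1:Int))
      = [] ++ List.replicate zl.length 1 ++ List.replicate (s.length - t.length) 1 := by
    rw [List.nil_append, ← List.replicate_add]
    congr 1
    omega
  have hmask := pv_mask_foldl zl [] (List.replicate (s.length - t.length) 1)
  simp only [List.length_nil, Nat.cast_zero, List.nil_append] at hmask
  rw [hrep]
  simp only [List.nil_append]
  rw [hmask, hz]
  have hlen : 0 + ((s.zip t).map (fun p : Char × Char => if p.1 == p.2 then (0:Int) else 1)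
      ++ List.replicate (s.length - t.length) 1).length = s.length := by
    simp [List.length_zip]
    omega
  have := pv_sel s ((s.zip t).map (fun p : Char × Char => if p.1 == p.2 then (0:Int) else 1)
      ++ List.replicate (s.length - t.length) 1) 0 hlen
  simp only [Nat.cast_zero, List.drop_zero] at this
  rw [this]
  exact pv_combine s t ht

-- ===== VERDICT (by name: the statement is the Claim_ definition above) =====
theorem cal_str_diff_spec : Claim_equal_cal_str_diff := by
  intro s1 s2 _
  unfold Spec_cal_str_diff cal_str_diff cal_str_diff_alt
  by_cases h : s1.toList.length > s2.toList.length
  · simp only [h, if_pos]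
    congr 1
    have hmax : max s1.toList.length s2.toList.length = s1.toList.length :=
      Nat.max_eq_left (Nat.le_of_lt h)
    rw [hmax]
    have hb := pv_bscan s2.toList s1.toList 0 []
    simp only [Nat.cast_zero, List.drop_zero, Nat.sub_zero, List.nil_append] at hb
    rw [hb]
    exact pv_a_eq s1.toList s2.toList (Nat.le_of_lt h) (s1.toList.zip s2.toList) rfl
      (by rw [List.length_zip]; exact Nat.min_eq_right (Nat.le_of_lt h))
  · simp only [gt_iff_lt] at h ⊢
    rw [if_neg h, if_neg h]
    congr 1
    have hle : s1.toList.length ≤ s2.toList.length := Nat.le_of_not_lt h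
    have hmax : max s1.toList.length s2.toList.length = s2.toList.length :=
      Nat.max_eq_right hle
    rw [hmax]
    have hb := pv_bscan s1.toList s2.toList 0 []
    simp only [Nat.cast_zero, List.drop_zero, Nat.sub_zero, List.nil_append] at hb
    rw [hb]
    exact pv_a_eq s2.toList s1.toList hle (s1.toList.zip s2.toList)
      (pv_zip_swap s1.toList s2.toList)
      (by rw [List.length_zip]; exact Nat.min_eq_left hle)
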